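-- pv_equiv track=rewrite | github.com/gupta-ayushh/INTER-IIT-QUANT-PS-2024 | code/main_2_btc.py | transform
-- ===== SOURCE A (Python) =====
-- def transform(signals):
--     pos = 0
--     final_signals = []
--     for signal in signals:
--         if signal == 0:
--             final_signals.append(0)
--         elif signal == 1:
--             if pos == 0:
--                 final_signals.append(1)
--                 pos += 1
--             elif pos == -1:
--                 final_signals.append(2)
--                 pos += 2
--             else:
--                 final_signals.append(0)
--
--         elif signal == -1:
--             if pos == 0:
--                 final_signals.append(-1)
--                 pos -= 1
--             elif pos == 1:
--                 pos -= 2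
--                 final_signals.append(-2)
--             else:
--                 final_signals.append(0)
--     return final_signals
-- ===== SOURCE B (Python) =====
-- def transform(signals):
--     # Output for a valid nonzero signal s is always s - prev, where prev is the
--     # last previous nonzero valid signal (0 if none); zeros emit 0; others are skipped.
--     valid = [s for s in signals if s in (-1, 0, 1)]
--     prevs = [0]
--     for s in valid:
--         prevs.append(s or prevs[-1])
--     return [s - p if s else 0 for s, p in zip(valid, prevs)]
-- ===== Notes on version B (the rewrite author's own statement) =====
-- stated objective: alternative
-- what changed: Replaced the position state machine with staged passes and an arithmetic closed form: filter to valid signals, prefix-scan the last nonzero signal, and emit s - prev (0 for zeros) — the branching disappears into a subtraction.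
import Mathlib
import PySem

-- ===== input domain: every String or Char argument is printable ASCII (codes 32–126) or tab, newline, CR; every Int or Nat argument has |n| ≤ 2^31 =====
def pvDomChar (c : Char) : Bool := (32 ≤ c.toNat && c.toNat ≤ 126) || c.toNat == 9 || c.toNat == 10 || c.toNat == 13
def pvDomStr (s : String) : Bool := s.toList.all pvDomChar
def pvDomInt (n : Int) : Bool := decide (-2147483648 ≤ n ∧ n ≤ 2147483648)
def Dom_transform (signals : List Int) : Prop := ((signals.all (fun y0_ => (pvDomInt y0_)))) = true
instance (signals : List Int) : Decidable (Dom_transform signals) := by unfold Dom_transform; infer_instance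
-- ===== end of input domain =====

-- B replaces A's position state machine by staged passes and an arithmetic closed form
-- (filter valid signals, prefix-scan the last nonzero signal, emit s - prev); objective: alternative.

-- ===== PORT A =====
def transform (signals : List Int) : List Int :=
  (signals.foldl (fun (st : Int × List Int) signal =>
    let pos := st.1
    let final_signals := st.2
    if signal = 0 then (pos, final_signals ++ [0])
    else if signal = 1 then
      if pos = 0 then (pos + 1, final_signals ++ [1])
      else if pos = -1 then (pos + 2, final_signals ++ [2])
      else (pos, final_signals ++ [0])
    else if signal = -1 then
      if pos = 0 then (pos - 1, final_signals ++ [-1])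
      else if pos = 1 then (pos - 2, final_signals ++ [-2])
      else (pos, final_signals ++ [0])
    else (pos, final_signals)) ((0 : Int), ([] : List Int))).2

-- ===== PORT B =====
-- Source B: valid = [s for s in signals if s in (-1,0,1)]; prevs grown by a loop appending
-- (s or prevs[-1]); result = [s - p if s else 0 for s, p in zip(valid, prevs)].
def transform_alt (signals : List Int) : List Int :=
  let valid := signals.filter (fun s => decide (s = -1) || decide (s = 0) || decide (s = 1))
  let prevs := valid.foldl
    (fun (prevs : List Int) s => prevs ++ [if s = 0 then prevs.getLastD 0 else s]) [(0 : Int)]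
  (valid.zip prevs).map (fun sp => if sp.1 = 0 then 0 else sp.1 - sp.2)

-- ===== PRECONDITION & SPEC =====
def Spec_transform (signals : List Int) (out : List Int) : Prop := out = transform_alt signals
instance (signals : List Int) (out : List Int) : Decidable (Spec_transform signals out) := by
  unfold Spec_transform; infer_instance

-- ===== CLAIM =====
def Claim_equal_transform : Prop :=
  ∀ (signals : List Int), Dom_transform signals → Spec_transform signals (transform signals)

-- ===== LEMMAS AND PROOFS =====

-- Reference recursion: outputs of the valid-signal list with running last-nonzero state.
def hAux : List Int → Int → List Int
  | [], _ => []
  | s :: r, p => (if s = 0 then 0 else s - p) :: hAux r (if s = 0 then p else s)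

-- A's fold from any reachable position p equals acc ++ hAux (valid signals) p.
theorem transform_fold_eq_hAux (signals : List Int) (p : Int) (acc : List Int)
    (hp : p = -1 ∨ p = 0 ∨ p = 1) :
    (signals.foldl (fun (st : Int × List Int) signal =>
      let pos := st.1
      let final_signals := st.2
      if signal = 0 then (pos, final_signals ++ [0])
      else if signal = 1 then
        if pos = 0 then (pos + 1, final_signals ++ [1])
        else if pos = -1 then (pos + 2, final_signals ++ [2])
        else (pos, final_signals ++ [0])
      else if signal = -1 then
        if pos = 0 then (pos - 1, final_signals ++ [-1])
        else if pos = 1 then (pos - 2, final_signals ++ [-2])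
        else (pos, final_signals ++ [0])
      else (pos, final_signals)) (p, acc)).2
    = acc ++ hAux (signals.filter (fun s => decide (s = -1) || decide (s = 0) || decide (s = 1))) p := by
  induction signals generalizing p acc with
  | nil => simp [hAux]
  | cons s rest ih =>
    simp only [List.foldl_cons, List.filter_cons]
    by_cases h0 : s = 0
    · subst h0
      have h := ih p (acc ++ [0]) hp
      rw [List.append_assoc, List.singleton_append] at h
      simpa [hAux] using h
    · by_cases h1 : s = 1
      · subst h1
        have hp1 : (1:Int) = -1 ∨ (1:Int) = 0 ∨ (1:Int) = 1 := by norm_num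
        rcases hp with h | h | h <;> subst h
        · have h := ih 1 (acc ++ [2]) hp1
          rw [List.append_assoc, List.singleton_append] at h
          simpa [hAux] using h
        · have h := ih 1 (acc ++ [1]) hp1
          rw [List.append_assoc, List.singleton_append] at h
          simpa [hAux] using h
        · have h := ih 1 (acc ++ [0]) hp1
          rw [List.append_assoc, List.singleton_append] at h
          simpa [hAux] using h
      · by_cases hm1 : s = -1
        · subst hm1
          have hpm : (-1:Int) = -1 ∨ (-1:Int) = 0 ∨ (-1:Int) = 1 := by norm_num
          rcases hp with h | h | h <;> subst h
          · have h := ih (-1) (acc ++ [0]) hpm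
            rw [List.append_assoc, List.singleton_append] at h
            simpa [hAux] using h
          · have h := ih (-1) (acc ++ [-1]) hpm
            rw [List.append_assoc, List.singleton_append] at h
            simpa [hAux] using h
          · have h := ih (-1) (acc ++ [-2]) hpm
            rw [List.append_assoc, List.singleton_append] at h
            simpa [hAux] using h
        · simpa [h0, h1, hm1] using ih p acc hp

-- Source B's prevs loop builds the scanl of "last nonzero" (generalized over a nonempty prefix).
theorem prevs_foldl_eq_scanl (valid : List Int) (pre : List Int) (hpre : pre ≠ []) :
    valid.foldl (fun (prevs : List Int) s => prevs ++ [if s = 0 then prevs.getLastD 0 else s]) pre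
    = pre.dropLast ++ valid.scanl (fun p s => if s = 0 then p else s) (pre.getLastD 0) := by
  induction valid generalizing pre with
  | nil =>
    rw [List.foldl_nil, List.scanl_nil]
    conv_lhs => rw [← List.dropLast_concat_getLast hpre]
    simp [List.getLastD_eq_getLast?, List.getLast?_eq_getLast_of_ne_nil hpre]
  | cons s r ih =>
    rw [List.foldl_cons, List.scanl_cons,
      ih (pre ++ [if s = 0 then pre.getLastD 0 else s]) (by simp)]
    conv_lhs => rw [← List.dropLast_concat_getLast hpre]
    simp [List.getLastD_eq_getLast?, List.getLast?_eq_getLast_of_ne_nil hpre, List.append_assoc]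

-- Zipping valid with its scanl of last-nonzero and emitting s - p is hAux.
theorem zip_scanl_eq_hAux (valid : List Int) (p : Int) :
    ((valid.zip (valid.scanl (fun p s => if s = 0 then p else s) p)).map
      (fun sp => if sp.1 = 0 then 0 else sp.1 - sp.2))
    = hAux valid p := by
  induction valid generalizing p with
  | nil => simp [hAux]
  | cons s r ih => rw [List.scanl_cons]; simp [hAux, ih]

-- ===== VERDICT =====
theorem transform_eq_hAux (signals : List Int) :
    transform signals
      = hAux (signals.filter (fun s => decide (s = -1) || decide (s = 0) || decide (s = 1))) 0 := by
  unfold transform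
  simpa using transform_fold_eq_hAux signals 0 [] (by norm_num)

theorem transform_alt_eq_hAux (signals : List Int) :
    transform_alt signals
      = hAux (signals.filter (fun s => decide (s = -1) || decide (s = 0) || decide (s = 1))) 0 := by
  simp only [transform_alt]
  rw [prevs_foldl_eq_scanl _ [0] (by simp)]
  simpa using zip_scanl_eq_hAux _ 0

-- ===== VERDICT (2) =====
theorem transform_spec : Claim_equal_transform := by
  intro signals _
  unfold Spec_transform
  rw [transform_eq_hAux, transform_alt_eq_hAux]
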